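-- pv_equiv track=rewrite | github.com/znehAC/BPMcompression | dct.py | rLEncode
-- ===== SOURCE A (Python) =====
-- def rLEncode(array):
--     lastNonZero = 0 # numero do indice do ultimo elemento nao zero
--     zerosCount = 0
--     result = []
--     for i in range(len(array)-1, -1, -1): # percorre o array ao contrario
--         if array[i] != 0:
--             lastNonZero = i
--             break
--         zerosCount += 1
--
--     result.append(lastNonZero+1) # adiciona o numero de elementos nao zero no inicio do codigo
--
--     for i in range(lastNonZero+1): # adiciona os elementos nao zeros
--         result.append(array[i])
--
--     result.append(zerosCount) # adiciona a quantidade de zeros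
--     return result
-- ===== SOURCE B (Python) =====
-- def rLEncode(array):
--     lastNonZero = 0
--     zerosCount = 0
--     for i, v in enumerate(array):
--         if v != 0:
--             lastNonZero = i
--             zerosCount = 0
--         else:
--             zerosCount += 1
--     return [lastNonZero + 1] + array[:lastNonZero + 1] + [zerosCount]
-- ===== Notes on version B (the rewrite author's own statement) =====
-- stated objective: simpler
-- what changed: Replaces the reverse scan with break (then a second index loop copying the prefix) by one forward pass that resets a zeros counter on each non-zero element, then builds the result with a slice.
import Mathlib
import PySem

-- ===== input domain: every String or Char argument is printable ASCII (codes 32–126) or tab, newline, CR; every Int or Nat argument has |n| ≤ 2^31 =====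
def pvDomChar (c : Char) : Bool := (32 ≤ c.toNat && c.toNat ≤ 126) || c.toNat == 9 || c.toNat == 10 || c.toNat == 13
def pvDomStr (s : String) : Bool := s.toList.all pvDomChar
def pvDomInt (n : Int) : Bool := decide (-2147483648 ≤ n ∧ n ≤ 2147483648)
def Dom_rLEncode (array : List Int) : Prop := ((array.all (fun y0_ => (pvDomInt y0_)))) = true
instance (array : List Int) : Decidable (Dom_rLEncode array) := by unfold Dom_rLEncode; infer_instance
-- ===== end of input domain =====

-- B replaces A's reverse scan-with-break plus prefix-copy loop by a single forward
-- pass that resets the zeros counter at each non-zero element, then one slice (simpler).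


-- ===== PORT A =====
-- A's first loop: walk indices len-1 .. 0, break at the first non-zero element.
def rLEncodeFind (array : List Int) : List Int → Int × Int → Int × Int
  | [], st => st
  | i :: rest, (lnz, zc) =>
    if PySem.List.pyGetD array i 0 ≠ 0 then (i, zc)
    else rLEncodeFind array rest (lnz, zc + 1)

def rLEncode (array : List Int) : List Int :=
  let st := rLEncodeFind array (PySem.List.pyRange ((array.length : Int) - 1) (-1) (-1)) (0, 0)
  [st.1 + 1] ++ (PySem.List.pyRange 0 (st.1 + 1) 1).map (fun i => PySem.List.pyGetD array i 0)
    ++ [st.2]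

-- ===== PORT B =====
def rLEncode_alt (array : List Int) : List Int :=
  let st := (PySem.List.enumerate array 0).foldl
    (fun (st : Int × Int) p => if p.2 ≠ 0 then (p.1, 0) else (st.1, st.2 + 1)) (0, 0)
  (st.1 + 1) :: (PySem.List.slice array none (some (st.1 + 1)) ++ [st.2])

-- ===== PRECONDITION & SPEC =====
-- Pre_ excludes only the empty list, on which A raises IndexError (array[0] in its copy loop).
def Pre_rLEncode (array : List Int) : Prop := array ≠ []
instance (array : List Int) : Decidable (Pre_rLEncode array) := by unfold Pre_rLEncode; infer_instance
def pvWitness_rLEncode : List Int := [3, 0, 0]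

def Spec_rLEncode (array : List Int) (out : List Int) : Prop := out = rLEncode_alt array
instance (array : List Int) (out : List Int) : Decidable (Spec_rLEncode array out) := by unfold Spec_rLEncode; infer_instance

-- ===== CLAIM (what is proved, stated in full; the proofs are below) =====
def Claim_equal_rLEncode : Prop := ∀ (array : List Int), Dom_rLEncode array → Pre_rLEncode array → Spec_rLEncode array (rLEncode array)

-- ===== LEMMAS AND PROOFS =====

-- abbreviation for B's fold step over the enumerated list
def altStep (st : Int × Int) (p : Int × Int) : Int × Int :=
  if p.2 ≠ 0 then (p.1, 0) else (st.1, st.2 + 1)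

def altState (array : List Int) : Int × Int :=
  (PySem.List.enumerate array 0).foldl altStep (0, 0)

def aState (array : List Int) : Int × Int :=
  rLEncodeFind array (PySem.List.pyRange ((array.length : Int) - 1) (-1) (-1)) (0, 0)

-- A's scan only looks up the indices it visits
theorem rLEncodeFind_congr (a b : List Int) :
    ∀ (r : List Int) (st : Int × Int),
      (∀ i ∈ r, PySem.List.pyGetD a i 0 = PySem.List.pyGetD b i 0) →
      rLEncodeFind a r st = rLEncodeFind b r st := by
  intro r
  induction r with
  | nil => intro st _; rfl
  | cons i rest ih =>
    intro st h
    obtain ⟨lnz, zc⟩ := st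
    simp only [rLEncodeFind, h i (by simp)]
    split
    · rfl
    · exact ih _ (fun j hj => h j (List.mem_cons_of_mem _ hj))

-- shifting the initial zero counter shifts the counter of an unsuccessful tail
theorem rLEncodeFind_shift (a : List Int) :
    ∀ (r : List Int) (l : Int) (c : Int),
      rLEncodeFind a r (l, c) =
        ((rLEncodeFind a r (l, 0)).1, (rLEncodeFind a r (l, 0)).2 + c) := by
  intro r
  induction r with
  | nil => intro l c; simp [rLEncodeFind]
  | cons i rest ih =>
    intro l c
    simp only [rLEncodeFind]
    split
    · simp
    · rw [ih _ (c + 1), ih _ (0 + 1)]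
      simp only [Prod.mk.injEq, true_and]
      ring

theorem aState_eq_altState (array : List Int) : aState array = altState array := by
  induction array using List.reverseRecOn with
  | nil => decide
  | append_singleton xs x ih =>
    have hlen : ((xs ++ [x]).length : Int) - 1 = (xs.length : Int) := by simp
    have hx : PySem.List.pyGetD (xs ++ [x]) (xs.length : Int) 0 = x := by
      simp [PySem.List.pyGetD_natCast]
    have hB : altState (xs ++ [x]) = altStep (altState xs) ((xs.length : Int), x) := by
      simp [altState, PySem.List.enumerate_append]
    rw [aState, hlen, PySem.List.pyRange_neg_one_cons (by omega)]
    simp only [rLEncodeFind, hx]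
    by_cases hx0 : x = 0
    · subst hx0
      simp only [ne_eq, not_true_eq_false, if_false]
      have hcong : rLEncodeFind (xs ++ [0]) (PySem.List.pyRange ((xs.length : Int) - 1) (-1) (-1)) (0, 0 + 1)
          = rLEncodeFind xs (PySem.List.pyRange ((xs.length : Int) - 1) (-1) (-1)) (0, 0 + 1) := by
        apply rLEncodeFind_congr
        intro i hi
        rw [PySem.List.mem_pyRange_neg_one] at hi
        obtain ⟨k, hk, rfl⟩ : ∃ k : Nat, k < xs.length ∧ (k : Int) = i := by
          refine ⟨i.toNat, ?_, ?_⟩ <;> omega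
        simp [PySem.List.pyGetD_natCast, List.getElem?_append_left hk]
      rw [hcong, rLEncodeFind_shift]
      rw [hB]
      simp only [altStep, ne_eq, not_true_eq_false, if_false]
      rw [← ih, aState]
      rw [rLEncodeFind_shift xs _ 0 0]
      simp
    · simp [hx0, hB, altStep]

-- the first component of B's state is 0 or a visited index
theorem altState_fst_cases :
    ∀ (ps : List (Int × Int)) (st : Int × Int),
      (ps.foldl altStep st).1 = st.1 ∨ ∃ p ∈ ps, (ps.foldl altStep st).1 = p.1 := by
  intro ps
  induction ps with
  | nil => intro st; left; rfl
  | cons p rest ih =>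
    intro st
    rcases ih (altStep st p) with h | ⟨q, hq, hres⟩
    · rw [List.foldl_cons, h]
      simp only [altStep]
      split
      · exact Or.inr ⟨p, by simp⟩
      · exact Or.inl rfl
    · exact Or.inr ⟨q, by simp [hq], by simp [hres]⟩

theorem altState_fst_bounds (array : List Int) (h : array ≠ []) :
    0 ≤ (altState array).1 ∧ (altState array).1 < (array.length : Int) := by
  rcases altState_fst_cases (PySem.List.enumerate array 0) (0, 0) with h0 | ⟨p, hp, hres⟩
  · unfold altState
    rw [h0]
    have hlen : 0 < array.length := List.length_pos_iff.mpr h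
    show (0:Int) ≤ 0 ∧ (0:Int) < (array.length : Int)
    exact ⟨le_refl 0, by exact_mod_cast hlen⟩
  · rw [PySem.List.mem_enumerate_iff] at hp
    obtain ⟨k, hk, rfl⟩ := hp
    unfold altState
    rw [hres]
    simp only [zero_add]
    constructor <;> omega

-- map of pyGetD over range 0..m is take m
theorem map_pyGetD_take (xs : List Int) (m : Nat) (hm : m ≤ xs.length) :
    (PySem.List.pyRange 0 (m : Int) 1).map (fun i => PySem.List.pyGetD xs i 0) = xs.take m := by
  rw [PySem.List.pyRange_one]
  apply List.ext_getElem
  · simp; omega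
  · intro k h1 h2
    simp only [List.getElem_map, List.getElem_range, List.getElem_take]
    have hk : k < m := by simpa using h1
    rw [show (0 : Int) + (k : Int) = (k : Int) by ring, PySem.List.pyGetD_natCast]
    exact List.getD_eq_getElem xs 0 (by omega)

-- ===== VERDICT (by name: the statement is the Claim_ definition above) =====
theorem rLEncode_spec : Claim_equal_rLEncode := by
  intro array _ hpre
  simp only [Spec_rLEncode, rLEncode, rLEncode_alt]
  rw [show rLEncodeFind array (PySem.List.pyRange ((array.length : Int) - 1) (-1) (-1)) (0, 0) = aState array from rfl,
      show (PySem.List.enumerate array 0).foldl (fun (st : Int × Int) p => if p.2 ≠ 0 then (p.1, 0) else (st.1, st.2 + 1)) (0, 0) = altState array from rfl,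
      aState_eq_altState]
  obtain ⟨hge, hlt⟩ := altState_fst_bounds array hpre
  have h1 : (altState array).1 + 1 = (((altState array).1.toNat + 1 : Nat) : Int) := by omega
  rw [h1, PySem.List.slice_to_natCast, map_pyGetD_take array _ (by omega)]
  simp
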